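-- pv_equiv track=rewrite | github.com/dubsidiya/checkbrain | desh/ege2026kp/27data/86/27-86b.py | mediana_y
-- ===== SOURCE A (Python) =====
-- def mediana_y(claster):
--     for point_1 in claster:
--         count = 0
--         for point_2 in claster:
--             if point_2[1] > point_1[1]:
--                 count += 1
--         if count == len(claster) // 2:
--             return point_1[1]
-- ===== SOURCE B (Python) =====
-- def mediana_y(claster):
--     ys = [p[1] for p in claster]
--     greater = {}
--     for i, v in enumerate(sorted(ys, reverse=True)):
--         if v not in greater:
--             greater[v] = i
--     half = len(ys) // 2
--     for v in ys:
--         if greater[v] == half: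
--             return v
-- ===== Notes on version B (the rewrite author's own statement) =====
-- stated objective: faster
-- what changed: Replaces the quadratic per-point rescan by one descending sort whose first-occurrence index of each y-value equals its strictly-greater count, stored in a dict and looked up in a single scan in original order.
import Mathlib
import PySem

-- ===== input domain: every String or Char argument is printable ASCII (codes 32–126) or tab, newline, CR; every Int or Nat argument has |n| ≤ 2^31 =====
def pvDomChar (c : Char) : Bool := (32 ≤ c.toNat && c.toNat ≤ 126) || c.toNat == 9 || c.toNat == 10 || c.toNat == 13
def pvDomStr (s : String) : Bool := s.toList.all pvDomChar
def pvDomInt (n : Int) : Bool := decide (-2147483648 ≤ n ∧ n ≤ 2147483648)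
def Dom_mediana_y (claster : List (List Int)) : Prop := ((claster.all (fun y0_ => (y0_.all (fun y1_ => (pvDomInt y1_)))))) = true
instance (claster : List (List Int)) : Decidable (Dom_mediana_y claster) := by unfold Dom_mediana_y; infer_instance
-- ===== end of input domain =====

-- B is faster: one descending sort, each value's first index there = its strictly-greater
-- count, kept in a dict, then a single scan in original order (A rescans per point).

-- ===== PORT A =====
-- p[1]; exact under Pre_ (every point has length ≥ 2, so pyGet? is some)
def pyY (p : List Int) : Int := (PySem.List.pyGet? p 1).getD 0

-- the outer 'for point_1 in claster: … return/continue' loop; claster stays the full list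
def mAgo (claster : List (List Int)) : List (List Int) → Option Int
  | [] => none
  | p1 :: rest =>
    let count : Int := claster.foldl (fun c p2 => if pyY p2 > pyY p1 then c + 1 else c) 0
    if count = PySem.Int.floordiv (claster.length : Int) 2 then some (pyY p1)
    else mAgo claster rest

def mediana_y (claster : List (List Int)) : Option Int := mAgo claster claster

-- ===== PORT B =====
def mediana_y_alt (claster : List (List Int)) : Option Int :=
  let ys := claster.map pyY
  let s := PySem.List.sorted ys (fun y => y) true
  let greater := (PySem.List.enumerate s 0).foldl
    (fun d p => if d.contains p.2 then d else d.insert p.2 p.1) PySem.Dict.empty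
  let half := PySem.Int.floordiv (ys.length : Int) 2
  ys.find? (fun v => greater.getD v 0 == half)

-- ===== PRECONDITION & SPEC =====
-- Pre_ excludes exactly the inputs where A raises IndexError: a point with fewer than 2 coordinates.
def Pre_mediana_y (claster : List (List Int)) : Prop := ∀ p ∈ claster, 2 ≤ p.length
instance (claster : List (List Int)) : Decidable (Pre_mediana_y claster) := by unfold Pre_mediana_y; infer_instance
def pvWitness_mediana_y : List (List Int) := [[0, 1], [0, 2]]
def Spec_mediana_y (claster : List (List Int)) (out : Option Int) : Prop := out = mediana_y_alt claster
instance (claster : List (List Int)) (out : Option Int) : Decidable (Spec_mediana_y claster out) := by unfold Spec_mediana_y; infer_instance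

-- ===== CLAIM (what is proved, stated in full; the proofs are below) =====
def Claim_equal_mediana_y : Prop := ∀ (claster : List (List Int)), Dom_mediana_y claster → Pre_mediana_y claster → Spec_mediana_y claster (mediana_y claster)

-- ===== LEMMAS AND PROOFS =====

-- A's inner counting loop is a countP
theorem foldl_count_gt (claster : List (List Int)) (y : Int) :
    claster.foldl (fun c p2 => if pyY p2 > y then c + 1 else c) (0 : Int)
      = (claster.countP (fun p2 => y < pyY p2) : Int) := by
  suffices h : ∀ (l : List (List Int)) (c : Int),
      l.foldl (fun c p2 => if pyY p2 > y then c + 1 else c) c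
        = c + (l.countP (fun p2 => y < pyY p2) : Int) by
    simpa using h claster 0
  intro l
  induction l with
  | nil => simp
  | cons p t ih =>
    intro c
    by_cases h : y < pyY p <;>
      simp [List.countP_cons, h, ih, List.foldl_cons] <;> push_cast <;> ring

-- A is find? of the count predicate, mapped through pyY
theorem mAgo_eq_find (claster l : List (List Int)) :
    mAgo claster l
      = (l.find? (fun p1 => ((claster.countP (fun p2 => pyY p1 < pyY p2) : Int)
          == PySem.Int.floordiv (claster.length : Int) 2))).map pyY := by
  induction l with
  | nil => simp [mAgo]
  | cons p t ih =>
    rw [mAgo, List.find?_cons]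
    simp only [foldl_count_gt]
    set half := PySem.Int.floordiv ((claster.length : Int)) 2 with hhalf
    by_cases h : ((claster.countP (fun p2 => pyY p < pyY p2) : Int) = half)
    · have hb : (((claster.countP (fun p2 => pyY p < pyY p2) : Int)) == half) = true :=
        beq_iff_eq.mpr h
      rw [if_pos h, hb]
      rfl
    · have hb : (((claster.countP (fun p2 => pyY p < pyY p2) : Int)) == half) = false :=
        beq_eq_false_iff_ne.mpr h
      rw [if_neg h, hb, ih, hhalf]

-- the insert-if-absent fold over enumerate: lookup = prior entry, else start + first index
theorem get?_foldl_enumerate (s : List Int) (s0 : Int) (d : PySem.Dict Int Int) (v : Int) :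
    ((PySem.List.enumerate s s0).foldl
        (fun d p => if d.contains p.2 then d else d.insert p.2 p.1) d).get? v
      = (d.get? v).orElse (fun _ => (s.idxOf? v).map (fun k => s0 + (k : Int))) := by
  induction s generalizing s0 d with
  | nil => simp [PySem.List.enumerate_nil]
  | cons x t ih =>
    rw [PySem.List.enumerate_cons, List.foldl_cons]
    by_cases hc : d.contains x = true
    · rw [if_pos hc, ih]
      by_cases hvx : v = x
      · subst hvx
        have hs : (d.get? v).isSome := by
          rw [← PySem.Dict.contains_eq_isSome_get?]; exact hc
        cases hg : d.get? v with
        | none => simp [hg] at hs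
        | some w => simp [hg, Option.orElse]
      · have hxv : ¬ x = v := fun hh => hvx hh.symm
        cases hg : d.get? v <;> cases hi : t.idxOf? v <;>
          simp [hg, hi, hxv, List.idxOf?_cons, Option.orElse] <;> push_cast <;> ring
    · rw [if_neg hc, ih]
      by_cases hvx : v = x
      · subst hvx
        have hg : d.get? v = none := by
          cases hg : d.get? v with
          | none => rfl
          | some w =>
            exfalso
            have hs : (d.get? v).isSome := by simp [hg]
            rw [← PySem.Dict.contains_eq_isSome_get?] at hs
            exact hc hs
        simp [PySem.Dict.get?_insert_self, hg, List.idxOf?_cons, Option.orElse]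
      · rw [PySem.Dict.get?_insert_of_ne _ _ hvx]
        have hxv : ¬ x = v := fun hh => hvx hh.symm
        cases hg : d.get? v <;> cases hi : t.idxOf? v <;>
          simp [hg, hi, hxv, List.idxOf?_cons, Option.orElse] <;> push_cast <;> ring

-- in a nonincreasing list, the first index of a member equals its strictly-greater count
theorem idxOf?_of_pairwise_ge (v : Int) (s : List Int)
    (hp : s.Pairwise (fun a b => b ≤ a)) (hv : v ∈ s) :
    s.idxOf? v = some (s.countP (fun w => v < w)) := by
  induction s with
  | nil => cases hv
  | cons x t ih =>
    rcases List.pairwise_cons.mp hp with ⟨hx, ht⟩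
    by_cases hvx : v = x
    · subst hvx
      have h0 : t.countP (fun w => v < w) = 0 := by
        rw [List.countP_eq_zero]
        intro w hw
        have := hx w hw
        simp; omega
      simp [List.idxOf?_cons, List.countP_cons, h0]
    · have hvt : v ∈ t := by
        cases hv with
        | head => exact absurd rfl hvx
        | tail _ h => exact h
      have hvlt : v < x := lt_of_le_of_ne (hx v hvt) hvx
      have hxv : ¬ x = v := fun hh => hvx hh.symm
      simp [List.idxOf?_cons, hxv, hvlt, ih ht hvt]

-- the dict lookup on any member of ys is the strictly-greater count in ys
theorem getD_greater (ys : List Int) (v : Int) (hv : v ∈ ys) :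
    (((PySem.List.enumerate (PySem.List.sorted ys (fun y => y) true) 0).foldl
        (fun d p => if d.contains p.2 then d else d.insert p.2 p.1)
        PySem.Dict.empty).getD v 0)
      = (ys.countP (fun w => v < w) : Int) := by
  set s := PySem.List.sorted ys (fun y => y) true with hs
  have hperm : s.Perm ys := PySem.List.sorted_perm ys (fun y => y) true
  have hvs : v ∈ s := hperm.mem_iff.mpr hv
  have hpw : s.Pairwise (fun a b => b ≤ a) :=
    PySem.List.sorted_pairwise_rev ys (fun y => y)
  have hidx := idxOf?_of_pairwise_ge v s hpw hvs
  have hcnt : s.countP (fun w => v < w) = ys.countP (fun w => v < w) :=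
    hperm.countP_eq _
  rw [PySem.Dict.getD_eq_get?_getD, get?_foldl_enumerate]
  simp [hidx, hcnt, Option.orElse]

theorem find?_congr_mem {α : Type} (l : List α) (p q : α → Bool)
    (h : ∀ a ∈ l, p a = q a) : l.find? p = l.find? q := by
  induction l with
  | nil => rfl
  | cons x t ih =>
    rw [List.find?_cons, List.find?_cons, h x List.mem_cons_self]
    cases q x with
    | true => rfl
    | false => exact ih (fun a ha => h a (List.mem_cons_of_mem x ha))

-- ===== VERDICT (by name: the statement is the Claim_ definition above) =====
theorem mediana_y_spec : Claim_equal_mediana_y := by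
  intro claster _ _
  unfold Spec_mediana_y mediana_y mediana_y_alt
  rw [mAgo_eq_find]
  rw [List.find?_map]
  simp only [List.length_map]
  congr 1
  apply find?_congr_mem
  intro p hp
  have hv : pyY p ∈ claster.map pyY := List.mem_map_of_mem hp
  simp only [Function.comp]
  rw [getD_greater _ _ hv]
  rw [List.countP_map]
  rfl
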